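-- pv_equiv track=rewrite | github.com/sskhan67/GPGPU-Programming- | QODE/qode/coupled_oscillators/nbody_hamiltonian_func.py | frag_num_to_coupling_mat_index
-- ===== SOURCE A (Python) =====
-- def frag_num_to_coupling_mat_index( num1, num2, num_frag ):
--     if num1 > num2:
--         tmp  = num1
--         num1 = num2
--         num2 = tmp
--
--     index_sum  = 0
--     num_column = num_frag - 2
--     for i in range(num1):
--         index_sum += num_column
--         num_column -= 1
--     index_sum = index_sum + num2 - 1  # num2 starts at 1 but the index is still 0, therefore minus one is needed.
--     return index_sum
-- ===== SOURCE B (Python) =====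
-- def frag_num_to_coupling_mat_index(num1, num2, num_frag):
--     lo, hi = (num1, num2) if num1 <= num2 else (num2, num1)
--     n = lo if lo > 0 else 0
--     return n * (2 * num_frag - 3 - n) // 2 + hi - 1
-- ===== Notes on version B (the rewrite author's own statement) =====
-- stated objective: faster
-- what changed: Replaced the O(num1) decrementing-accumulator loop by the arithmetic-series closed form n*(2*num_frag-3-n)//2 computed in O(1).
import Mathlib
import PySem

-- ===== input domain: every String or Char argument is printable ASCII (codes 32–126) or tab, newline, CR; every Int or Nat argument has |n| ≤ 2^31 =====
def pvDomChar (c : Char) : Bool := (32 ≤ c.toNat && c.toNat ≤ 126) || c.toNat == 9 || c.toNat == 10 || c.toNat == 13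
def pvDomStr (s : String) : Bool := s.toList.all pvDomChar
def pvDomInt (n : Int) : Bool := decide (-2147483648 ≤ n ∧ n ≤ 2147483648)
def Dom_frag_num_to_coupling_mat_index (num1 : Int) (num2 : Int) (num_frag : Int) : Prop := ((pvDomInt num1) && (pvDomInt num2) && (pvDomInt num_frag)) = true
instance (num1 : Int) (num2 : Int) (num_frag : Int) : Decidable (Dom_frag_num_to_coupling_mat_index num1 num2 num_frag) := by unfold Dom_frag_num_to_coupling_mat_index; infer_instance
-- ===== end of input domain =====

-- B replaces A's O(num1) decrementing-accumulator loop by the O(1) arithmetic-series closed form.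

-- ===== PORT A =====
def frag_num_to_coupling_mat_index (num1 : Int) (num2 : Int) (num_frag : Int) : Int :=
  -- if num1 > num2: swap
  let a := if num1 > num2 then num2 else num1
  let b := if num1 > num2 then num1 else num2
  -- for i in range(num1): index_sum += num_column; num_column -= 1
  let st := (PySem.List.pyRange 0 a 1).foldl
    (fun (st : Int × Int) _ => (st.1 + st.2, st.2 - 1)) (0, num_frag - 2)
  st.1 + b - 1

-- ===== PORT B =====
def frag_num_to_coupling_mat_index_alt (num1 : Int) (num2 : Int) (num_frag : Int) : Int :=
  let lo := if num1 ≤ num2 then num1 else num2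
  let hi := if num1 ≤ num2 then num2 else num1
  let n := if lo > 0 then lo else 0
  PySem.Int.floordiv (n * (2 * num_frag - 3 - n)) 2 + hi - 1

-- ===== PRECONDITION & SPEC =====
def Spec_frag_num_to_coupling_mat_index (num1 : Int) (num2 : Int) (num_frag : Int) (out : Int) : Prop := out = frag_num_to_coupling_mat_index_alt num1 num2 num_frag
instance (num1 : Int) (num2 : Int) (num_frag : Int) (out : Int) : Decidable (Spec_frag_num_to_coupling_mat_index num1 num2 num_frag out) := by unfold Spec_frag_num_to_coupling_mat_index; infer_instance

-- ===== CLAIM (what is proved, stated in full; the proofs are below) =====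
def Claim_equal_frag_num_to_coupling_mat_index : Prop := ∀ (num1 : Int) (num2 : Int) (num_frag : Int), Dom_frag_num_to_coupling_mat_index num1 num2 num_frag → Spec_frag_num_to_coupling_mat_index num1 num2 num_frag (frag_num_to_coupling_mat_index num1 num2 num_frag)

-- ===== LEMMAS AND PROOFS =====

-- the loop's running sum, doubled to stay division-free
theorem pvLoop_char (l : List Int) (s c : Int) :
    2 * ((l.foldl (fun (st : Int × Int) _ => (st.1 + st.2, st.2 - 1)) (s, c)).1)
      = 2 * s + 2 * (l.length : Int) * c - (l.length : Int) * ((l.length : Int) - 1) := by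
  induction l generalizing s c with
  | nil => simp
  | cons x xs ih =>
    simp only [List.foldl_cons, List.length_cons]
    rw [ih (s + c) (c - 1)]
    push_cast
    ring

theorem pvMain (num1 num2 num_frag : Int) :
    frag_num_to_coupling_mat_index num1 num2 num_frag
      = frag_num_to_coupling_mat_index_alt num1 num2 num_frag := by
  unfold frag_num_to_coupling_mat_index frag_num_to_coupling_mat_index_alt
  have hlen : ∀ a : Int, ((PySem.List.pyRange 0 a 1).length : Int) = if a > 0 then a else 0 := by
    intro a
    rw [PySem.List.length_pyRange_one]
    split_ifs with h <;> omega
  by_cases h12 : num1 > num2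
  · have h' : ¬ num1 ≤ num2 := by omega
    simp only [if_pos h12, if_neg h']
    set a := num2
    have h2 := pvLoop_char (PySem.List.pyRange 0 a 1) 0 (num_frag - 2)
    set st := (PySem.List.pyRange 0 a 1).foldl
      (fun (st : Int × Int) _ => (st.1 + st.2, st.2 - 1)) (0, num_frag - 2)
    set n := if a > 0 then a else 0 with hn
    have hN : ((PySem.List.pyRange 0 a 1).length : Int) = n := hlen a
    rw [hN] at h2
    have harg : n * (2 * num_frag - 3 - n) = 2 * st.1 := by rw [h2]; ring
    rw [harg, PySem.Int.floordiv_eq_ediv_of_pos (by norm_num),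
      Int.mul_ediv_cancel_left _ (by norm_num : (2:Int) ≠ 0)]
  · have h' : num1 ≤ num2 := by omega
    simp only [if_neg h12, if_pos h']
    set a := num1
    have h2 := pvLoop_char (PySem.List.pyRange 0 a 1) 0 (num_frag - 2)
    set st := (PySem.List.pyRange 0 a 1).foldl
      (fun (st : Int × Int) _ => (st.1 + st.2, st.2 - 1)) (0, num_frag - 2)
    set n := if a > 0 then a else 0 with hn
    have hN : ((PySem.List.pyRange 0 a 1).length : Int) = n := hlen a
    rw [hN] at h2
    have harg : n * (2 * num_frag - 3 - n) = 2 * st.1 := by rw [h2]; ring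
    rw [harg, PySem.Int.floordiv_eq_ediv_of_pos (by norm_num),
      Int.mul_ediv_cancel_left _ (by norm_num : (2:Int) ≠ 0)]

-- ===== VERDICT (by name: the statement is the Claim_ definition above) =====
theorem frag_num_to_coupling_mat_index_spec : Claim_equal_frag_num_to_coupling_mat_index := by
  intro num1 num2 num_frag _
  exact pvMain num1 num2 num_frag
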